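-- pv_equiv track=rewrite | github.com/matthewwoodc0/lerobot-gui-wrapper | robot_pipeline_app/compat.py | _choose_policy_path_flag
-- ===== SOURCE A (Python) =====
-- def _choose_policy_path_flag(flags: set[str]) -> str | None:
--     if "policy.path" in flags:
--         return "policy.path"
--     if "policy" in flags:
--         return "policy"
--     for candidate in sorted(flags):
--         normalized = candidate.lower()
--         if "policy" in normalized and "path" in normalized:
--             return candidate
--     return None
-- ===== SOURCE B (Python) =====
-- def _choose_policy_path_flag(flags: set[str]) -> str | None:
--     if "policy.path" in flags:
--         return "policy.path"
--     if "policy" in flags: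
--         return "policy"
--     return min(
--         (c for c in flags if "policy" in c.lower() and "path" in c.lower()),
--         default=None,
--     )
-- ===== Notes on version B (the rewrite author's own statement) =====
-- stated objective: simpler
-- what changed: The sorted() scan that returns the first case-insensitively matching flag is replaced by a single min() over the filtered flags, which yields the same lexicographically smallest match without sorting.
import Mathlib
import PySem

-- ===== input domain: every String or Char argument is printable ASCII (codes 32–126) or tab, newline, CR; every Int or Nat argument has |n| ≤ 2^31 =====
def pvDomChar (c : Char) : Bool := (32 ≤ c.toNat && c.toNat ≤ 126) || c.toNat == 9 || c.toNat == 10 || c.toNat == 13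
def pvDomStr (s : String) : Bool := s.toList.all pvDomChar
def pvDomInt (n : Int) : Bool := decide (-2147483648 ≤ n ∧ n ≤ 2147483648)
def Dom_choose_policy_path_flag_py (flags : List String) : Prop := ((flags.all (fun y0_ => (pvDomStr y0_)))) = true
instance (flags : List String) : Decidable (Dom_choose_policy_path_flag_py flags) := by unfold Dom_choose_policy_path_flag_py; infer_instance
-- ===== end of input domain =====

-- B replaces A's sorted() scan by a single min() over the filtered flags (same value, no sort): simpler.


-- ===== PORT A =====
-- the for-loop over sorted(flags): return the first candidate whose lowercase form contains both substrings
def pvLoopA : List String → Option String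
  | [] => none
  | candidate :: rest =>
    let normalized := PySem.Str.lower candidate
    if PySem.Str.isIn "policy" normalized && PySem.Str.isIn "path" normalized then
      some candidate
    else
      pvLoopA rest

def choose_policy_path_flag_py (flags : List String) : Option String :=
  if flags.contains "policy.path" then some "policy.path"
  else if flags.contains "policy" then some "policy"
  else pvLoopA (PySem.List.sorted flags (fun x => x) false)

-- ===== PORT B =====
def choose_policy_path_flag_py_alt (flags : List String) : Option String :=
  if flags.contains "policy.path" then some "policy.path"
  else if flags.contains "policy" then some "policy"
  else
    PySem.List.min?
      (flags.filter (fun c =>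
        let normalized := PySem.Str.lower c
        PySem.Str.isIn "policy" normalized && PySem.Str.isIn "path" normalized))
      (fun x => x)

-- ===== PRECONDITION & SPEC =====
def Spec_choose_policy_path_flag_py (flags : List String) (out : Option String) : Prop := out = choose_policy_path_flag_py_alt flags
instance (flags : List String) (out : Option String) : Decidable (Spec_choose_policy_path_flag_py flags out) := by unfold Spec_choose_policy_path_flag_py; infer_instance

-- ===== CLAIM (what is proved, stated in full; the proofs are below) =====
def Claim_equal_choose_policy_path_flag_py : Prop := ∀ (flags : List String), Dom_choose_policy_path_flag_py flags → Spec_choose_policy_path_flag_py flags (choose_policy_path_flag_py flags)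

-- ===== LEMMAS AND PROOFS =====

-- min over a list with the identity key is determined by membership plus minimality
theorem pv_min?_id_eq_some_iff {α : Type} [LinearOrder α] (xs : List α) (m : α) :
    PySem.List.min? xs (fun x => x) = some m ↔ m ∈ xs ∧ ∀ y ∈ xs, m ≤ y := by
  constructor
  · intro h
    exact ⟨PySem.List.min?_mem h, PySem.List.min?_isMin h⟩
  · rintro ⟨hm, hmin⟩
    cases hx : PySem.List.min? xs (fun x => x) with
    | none =>
      rw [PySem.List.min?_eq_none_iff] at hx
      simp [hx] at hm
    | some m' =>
      have h1 : m' ≤ m := PySem.List.min?_isMin hx m hm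
      have h2 : m ≤ m' := hmin m' (PySem.List.min?_mem hx)
      exact congrArg some (le_antisymm h1 h2)

-- identity-key min gives equal values on permuted lists
theorem pv_min?_id_perm {α : Type} [LinearOrder α] {xs ys : List α} (h : xs.Perm ys) :
    PySem.List.min? xs (fun x => x) = PySem.List.min? ys (fun x => x) := by
  cases hx : PySem.List.min? xs (fun x => x) with
  | none =>
    rw [PySem.List.min?_eq_none_iff] at hx
    subst hx
    symm
    rw [PySem.List.min?_eq_none_iff]
    exact h.nil_eq.symm
  | some m =>
    rw [pv_min?_id_eq_some_iff] at hx
    symm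
    rw [pv_min?_id_eq_some_iff]
    exact ⟨h.mem_iff.mp hx.1, fun y hy => hx.2 y (h.mem_iff.mpr hy)⟩

theorem pv_foldl_min_eq_self {α : Type} [LinearOrder α] (c : α) (l : List α)
    (h : ∀ y ∈ l, c ≤ y) : l.foldl min c = c := by
  induction l with
  | nil => rfl
  | cons y t ih =>
    have hcy : min c y = c := min_eq_left (h y (List.mem_cons_self))
    simpa [List.foldl_cons, hcy] using ih (fun z hz => h z (List.mem_cons_of_mem _ hz))

-- on a (≤)-sorted list, the first match equals the min of all matches
theorem pv_loopA_eq_min? (s : List String) (hs : s.Pairwise (· ≤ ·)) :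
    pvLoopA s =
      PySem.List.min?
        (s.filter (fun c =>
          let normalized := PySem.Str.lower c
          PySem.Str.isIn "policy" normalized && PySem.Str.isIn "path" normalized))
        (fun x => x) := by
  induction s with
  | nil => rfl
  | cons c t ih =>
    rcases List.pairwise_cons.mp hs with ⟨hc, ht⟩
    by_cases hp : (PySem.Str.isIn "policy" (PySem.Str.lower c) && PySem.Str.isIn "path" (PySem.Str.lower c)) = true
    · have hfil : ∀ y ∈ t.filter (fun c =>
          let normalized := PySem.Str.lower c
          PySem.Str.isIn "policy" normalized && PySem.Str.isIn "path" normalized), c ≤ y :=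
        fun y hy => hc y (List.mem_of_mem_filter hy)
      simp only [pvLoopA, List.filter_cons, hp, if_pos]
      rw [PySem.List.min?_id_cons, pv_foldl_min_eq_self _ _ hfil]
    · simp only [pvLoopA, List.filter_cons, hp]
      simpa [hp] using ih ht

-- ===== VERDICT (by name: the statement is the Claim_ definition above) =====
theorem choose_policy_path_flag_py_spec : Claim_equal_choose_policy_path_flag_py := by
  intro flags _
  unfold Spec_choose_policy_path_flag_py choose_policy_path_flag_py choose_policy_path_flag_py_alt
  split_ifs
  · rfl
  · rfl
  · have hpw : (PySem.List.sorted flags (fun x => x) false).Pairwise (· ≤ ·) := by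
      simpa using PySem.List.sorted_pairwise flags (fun x => x)
    rw [pv_loopA_eq_min? _ hpw]
    exact pv_min?_id_perm ((PySem.List.sorted_perm flags (fun x => x) false).filter _)
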